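-- pv_equiv track=rewrite | github.com/dharshakch97-cloud/HackerRank-code-sessions | Majorscales.py | solve
-- ===== SOURCE A (Python) =====
-- def solve(lines):
--     line = lines
--     notes = ['C', 'C#', 'D', 'D#', 'E', 'F', 'F#', 'G', 'G#', 'A', 'A#', 'B']
--     majors = []
--     tones = [2, 2, 1, 2, 2, 2, 1]
--     for n in notes:
--         row = []
--         p = notes.index(n)
--         for t in tones:
--             row.append(notes[p])
--             p += t
--             p %= len(notes)
--         majors.append(row)
--
--     results = []
--     for m in majors:
--         flag = True
--         for n in line:
--             if n not in m:
--                 flag = False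
--                 break
--         if flag:
--             results.append(m[0])
--
--     return ' '.join(results)
-- ===== SOURCE B (Python) =====
-- def solve(lines):
--     notes = ['C', 'C#', 'D', 'D#', 'E', 'F', 'F#', 'G', 'G#', 'A', 'A#', 'B']
--     tones = [2, 2, 1, 2, 2, 2, 1]
--     # inverted index: note -> set of scale roots whose major scale contains that note
--     index = {n: set() for n in notes}
--     for i, root in enumerate(notes):
--         p = i
--         for t in tones:
--             index[notes[p]].add(root)
--             p = (p + t) % 12
--     candidates = set(notes)
--     for n in lines:
--         candidates &= index.get(n, set())
--     return ' '.join(r for r in notes if r in candidates)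
-- ===== Notes on version B (the rewrite author's own statement) =====
-- stated objective: alternative
-- what changed: Replaces A's per-scale scan of the input (12 scales x membership test per note) by an inverted index mapping each note to the set of scale roots containing it, intersected over the input notes, then emitted in canonical note order.
import Mathlib
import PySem

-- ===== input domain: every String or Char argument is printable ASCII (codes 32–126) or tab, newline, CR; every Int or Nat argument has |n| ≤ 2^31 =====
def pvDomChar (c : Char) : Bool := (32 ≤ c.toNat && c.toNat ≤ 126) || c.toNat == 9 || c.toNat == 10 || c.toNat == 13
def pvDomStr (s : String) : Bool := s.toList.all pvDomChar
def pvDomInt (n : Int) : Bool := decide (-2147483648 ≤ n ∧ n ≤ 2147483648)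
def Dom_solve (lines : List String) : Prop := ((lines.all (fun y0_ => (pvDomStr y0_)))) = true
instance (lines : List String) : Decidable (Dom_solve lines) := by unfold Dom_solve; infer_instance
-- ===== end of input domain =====

-- B replaces A's per-scale membership scan by an inverted note→roots index intersected
-- over the input (alternative decomposition; same exact output).

-- ===== PORT A =====
def pvNotes : List String := ["C", "C#", "D", "D#", "E", "F", "F#", "G", "G#", "A", "A#", "B"]

def pvTones : List Int := [2, 2, 1, 2, 2, 2, 1]

-- the inner 'for t in tones' loop building one scale row (state: row so far, cursor p)
def pvRow (n : String) : List String :=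
  (pvTones.foldl
    (fun (st : List String × Int) t =>
      (st.1 ++ [PySem.List.pyGetD pvNotes st.2 ""], PySem.Int.mod (st.2 + t) (pvNotes.length : Int)))
    ([], (((PySem.List.index? pvNotes n).getD 0 : Nat) : Int))).1

def pvMajors : List (List String) := pvNotes.foldl (fun acc n => acc ++ [pvRow n]) []

-- the 'flag/break' scan over the input line for one scale m
def pvCheck (m : List String) (line : List String) : Bool :=
  match line with
  | [] => true
  | n :: rest => if m.contains n = false then false else pvCheck m rest

def solve (lines : List String) : String :=
  PySem.Str.join " "
    (pvMajors.foldl (fun res m => if pvCheck m lines then res ++ [PySem.List.pyGetD m 0 ""] else res) [])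

-- ===== PORT B =====
-- (B uses the same literal notes/tones lists pvNotes/pvTones as A)
-- inverted index: note -> set of scale roots whose major scale contains that note
def pvStep (root : String) (st : PySem.Dict String (PySem.Set String) × Int) (t : Int) :
    PySem.Dict String (PySem.Set String) × Int :=
  (st.1.modify (PySem.List.pyGetD pvNotes st.2 "") PySem.Set.empty (fun s => PySem.Set.add s root),
   PySem.Int.mod (st.2 + t) 12)

def pvIndex : PySem.Dict String (PySem.Set String) :=
  let d0 : PySem.Dict String (PySem.Set String) :=
    pvNotes.foldl (fun d n => d.insert n PySem.Set.empty) PySem.Dict.empty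
  (PySem.List.enumerate pvNotes).foldl
    (fun d ir => (pvTones.foldl (pvStep ir.2) (d, ir.1)).1) d0

def pvCand (lines : List String) : PySem.Set String :=
  lines.foldl (fun c n => PySem.Set.inter c (pvIndex.getD n PySem.Set.empty))
    (PySem.Set.ofList pvNotes)

def solve_alt (lines : List String) : String :=
  PySem.Str.join " " (pvNotes.filter (fun r => PySem.Set.contains (pvCand lines) r))

-- ===== PRECONDITION & SPEC =====
def Spec_solve (lines : List String) (out : String) : Prop := out = solve_alt lines
instance (lines : List String) (out : String) : Decidable (Spec_solve lines out) := by unfold Spec_solve; infer_instance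

-- ===== CLAIM (what is proved, stated in full; the proofs are below) =====
def Claim_equal_solve : Prop := ∀ (lines : List String), Dom_solve lines → Spec_solve lines (solve lines)

-- ===== LEMMAS AND PROOFS =====

-- A's flag/break scan is List.all
theorem pvCheck_eq_all (m line : List String) :
    pvCheck m line = line.all (fun n => m.contains n) := by
  induction line with
  | nil => rfl
  | cons n rest ih =>
      simp only [pvCheck, List.all_cons, ih]
      cases h : m.contains n <;> simp

-- membership in B's fold of intersections
theorem mem_foldl_inter (lines : List String) (s : PySem.Set String)
    (g : String → PySem.Set String) (r : String) :
    r ∈ lines.foldl (fun c n => PySem.Set.inter c (g n)) s ↔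
      r ∈ s ∧ ∀ n ∈ lines, r ∈ g n := by
  induction lines generalizing s with
  | nil => simp
  | cons n rest ih =>
      simp only [List.foldl_cons, ih, PySem.Set.mem_inter, List.mem_cons]
      constructor
      · rintro ⟨⟨hs, hn⟩, h⟩
        exact ⟨hs, fun x hx => hx.elim (fun e => e ▸ hn) (h x)⟩
      · rintro ⟨hs, h⟩
        exact ⟨⟨hs, h n (Or.inl rfl)⟩, fun x hx => h x (Or.inr hx)⟩

-- every element of a scale row is one of the 12 canonical notes
set_option maxRecDepth 200000 in
theorem pvRow_subset (r : String) (hr : r ∈ pvNotes) (x : String) (hx : x ∈ pvRow r) :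
    x ∈ pvNotes := by
  revert hx x hr r
  decide

-- the inverted index, evaluated to a literal dict
set_option maxRecDepth 200000 in
theorem pvIndex_eq : pvIndex = PySem.Dict.mk
    [("C", ["C", "C#", "D#", "F", "G", "G#", "A#"]),
     ("C#", ["C#", "D", "E", "F#", "G#", "A", "B"]),
     ("D", ["C", "D", "D#", "F", "G", "A", "A#"]),
     ("D#", ["C#", "D#", "E", "F#", "G#", "A#", "B"]),
     ("E", ["C", "D", "E", "F", "G", "A", "B"]),
     ("F", ["C", "C#", "D#", "F", "F#", "G#", "A#"]),
     ("F#", ["C#", "D", "E", "F#", "G", "A", "B"]),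
     ("G", ["C", "D", "D#", "F", "G", "G#", "A#"]),
     ("G#", ["C#", "D#", "E", "F#", "G#", "A", "B"]),
     ("A", ["C", "D", "E", "F", "G", "A", "A#"]),
     ("A#", ["C#", "D#", "F", "F#", "G#", "A#", "B"]),
     ("B", ["C", "D", "E", "F#", "G", "A", "B"])] := by decide

-- the inverted index agrees with the scales, for every query string n
set_option maxRecDepth 200000 in
set_option maxHeartbeats 2000000 in
theorem pv_pointwise (r : String) (hr : r ∈ pvNotes) (n : String) :
    (pvRow r).contains n = PySem.Set.contains (pvIndex.getD n PySem.Set.empty) r := by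
  by_cases hn : n ∈ pvNotes
  · rw [pvIndex_eq]
    fin_cases hr <;> fin_cases hn <;> decide
  · have h1 : n ∉ pvRow r := fun hmem => hn (pvRow_subset r hr n hmem)
    have h2 : pvIndex.get? n = none := by
      rw [pvIndex_eq]
      simp [pvNotes] at hn
      push Not at hn
      obtain ⟨h0, h1', h2', h3, h4, h5, h6, h7, h8, h9, h10, h11⟩ := hn
      simp [PySem.Dict.get?_mk_cons, Ne.symm h0, Ne.symm h1', Ne.symm h2', Ne.symm h3,
        Ne.symm h4, Ne.symm h5, Ne.symm h6, Ne.symm h7, Ne.symm h8, Ne.symm h9,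
        Ne.symm h10, Ne.symm h11]
      rfl
    rw [PySem.Dict.getD_eq_get?_getD, h2]
    simp [h1]

-- the A-side acceptance test for root r equals B-side candidate membership
theorem pv_cond (lines : List String) (r : String) (hr : r ∈ pvNotes) :
    pvCheck (pvRow r) lines = PySem.Set.contains (pvCand lines) r := by
  rw [Bool.eq_iff_iff, pvCheck_eq_all, PySem.Set.contains_iff, pvCand, mem_foldl_inter,
    List.all_eq_true]
  constructor
  · intro h
    refine ⟨by rw [PySem.Set.mem_ofList]; exact hr, fun n hn => ?_⟩
    have := h n hn
    rw [pv_pointwise r hr n] at this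
    exact (PySem.Set.contains_iff _ _).mp this
  · rintro ⟨-, h⟩ n hn
    rw [pv_pointwise r hr n]
    exact (PySem.Set.contains_iff _ _).mpr (h n hn)

set_option maxRecDepth 200000 in
set_option maxHeartbeats 1000000 in
theorem pv_head (r : String) (hr : r ∈ pvNotes) :
    PySem.List.pyGetD (pvRow r) 0 "" = r := by
  fin_cases hr <;> decide

-- ===== VERDICT (by name: the statement is the Claim_ definition above) =====
set_option maxRecDepth 200000 in
set_option maxHeartbeats 2000000 in
theorem solve_spec : Claim_equal_solve := by
  intro lines _
  show solve lines = solve_alt lines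
  unfold solve solve_alt
  congr 1
  rw [pvMajors, PySem.List.foldl_append_singleton_eq_map, PySem.List.foldl_append_if]
  simp only [List.nil_append]
  rw [List.filter_map, List.map_map]
  rw [List.filter_congr (fun r hr => by
        show (pvCheck (pvRow r) lines) = _
        rw [pv_cond lines r hr])]
  exact List.map_congr_left (fun m hm => pv_head m (List.mem_of_mem_filter hm)) |>.trans
    (List.map_id _)
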